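-- pv_equiv track=rewrite | github.com/volesen/aoc2024 | day20/__main__.py | count_shortcuts
-- ===== SOURCE A (Python) =====
-- def manhattan(a, b=(0, 0)):
--     return abs(a[0] - b[0]) + abs(a[1] - b[1])
--
-- def get_neighbors(x, y, radius=1):
--     return (
--         (x + dx, y + dy)
--         for dx in range(-radius, radius + 1)
--         for dy in range(-radius, radius + 1)
--         if manhattan((dx, dy)) <= radius
--     )
--
-- def count_shortcuts(distances, radius, threshold):
--     return sum(
--         1
--         for point in distances.keys()
--         for neighbor in get_neighbors(*point, radius=radius)
--         if neighbor in distances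
--         # Check the improvement made by taking the shortcut
--         and (
--             distances[neighbor] - distances[point] - manhattan(point, neighbor)
--             >= threshold
--         )
--     )
-- ===== SOURCE B (Python) =====
-- def count_shortcuts(distances, radius, threshold):
--     # Iterate over all ordered pairs of stored points instead of enumerating
--     # each point's diamond neighborhood.
--     items = list(distances.items())
--     count = 0
--     for p, dp in items:
--         for q, dq in items:
--             d = abs(p[0] - q[0]) + abs(p[1] - q[1])
--             if d <= radius and dq - dp - d >= threshold:
--                 count += 1
--     return count
-- ===== Notes on version B (the rewrite author's own statement) =====
-- stated objective: faster
-- what changed: Instead of enumerating each point's diamond of (2r+1)^2 candidate offsets and testing dict membership, B loops over all ordered pairs of stored points and keeps those within manhattan distance radius, so the work depends on the number of stored points rather than on the radius.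
import Mathlib
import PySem

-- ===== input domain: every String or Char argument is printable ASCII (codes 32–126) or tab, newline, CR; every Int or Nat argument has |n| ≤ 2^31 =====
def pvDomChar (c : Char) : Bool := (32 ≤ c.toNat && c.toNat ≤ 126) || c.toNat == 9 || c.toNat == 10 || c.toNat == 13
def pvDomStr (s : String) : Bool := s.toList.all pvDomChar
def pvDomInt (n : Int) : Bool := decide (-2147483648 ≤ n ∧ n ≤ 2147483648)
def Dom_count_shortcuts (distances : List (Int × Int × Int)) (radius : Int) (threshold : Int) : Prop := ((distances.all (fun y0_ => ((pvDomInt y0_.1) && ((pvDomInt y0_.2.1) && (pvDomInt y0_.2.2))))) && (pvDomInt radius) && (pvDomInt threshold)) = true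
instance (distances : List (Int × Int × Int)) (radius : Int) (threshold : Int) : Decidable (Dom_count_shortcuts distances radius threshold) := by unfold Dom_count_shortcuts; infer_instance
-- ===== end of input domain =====

-- B replaces A's enumeration of each point's diamond of (2r+1)^2 offsets by a scan over
-- all ordered pairs of stored points, removing the dependence on the radius (faster in a timing run).

-- ===== PORT A =====

-- manhattan(a, b)
def pvMan (a b : Int × Int) : Int := |a.1 - b.1| + |a.2 - b.2|

-- get_neighbors(x, y, radius): nested generator, dy filtered by manhattan((dx,dy)) <= radius
def pvGetNeighbors (x y radius : Int) : List (Int × Int) :=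
  (PySem.List.pyRange (-radius) (radius + 1) 1).flatMap fun dx =>
    ((PySem.List.pyRange (-radius) (radius + 1) 1).filter fun dy =>
        decide (pvMan (dx, dy) (0, 0) ≤ radius)).map fun dy => (x + dx, y + dy)

-- dict lookup (first match), key (x, y), value the last component
def pvLookup (distances : List (Int × Int × Int)) (k : Int × Int) : Option Int :=
  match distances with
  | [] => none
  | e :: rest => if (e.1, e.2.1) = k then some e.2.2 else pvLookup rest k

-- the generator's filter: 'neighbor in distances and (distances[neighbor] - distances[point] - manhattan(point, neighbor) >= threshold)'
def pvCondA (distances : List (Int × Int × Int)) (threshold : Int) (point nb : Int × Int) : Bool :=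
  match pvLookup distances nb with
  | none => false
  | some dn => decide (dn - (pvLookup distances point).getD 0 - pvMan point nb ≥ threshold)

def count_shortcuts (distances : List (Int × Int × Int)) (radius : Int) (threshold : Int) : Int :=
  (distances.map fun e => (e.1, e.2.1)).foldl
    (fun acc point =>
      (pvGetNeighbors point.1 point.2 radius).foldl
        (fun acc nb => if pvCondA distances threshold point nb then acc + 1 else acc) acc)
    0

-- ===== PORT B =====
def count_shortcuts_alt (distances : List (Int × Int × Int)) (radius : Int) (threshold : Int) : Int :=
  distances.foldl
    (fun acc p =>
      distances.foldl
        (fun acc q =>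
          let d := |p.1 - q.1| + |p.2.1 - q.2.1|
          if decide (d ≤ radius) && decide (q.2.2 - p.2.2 - d ≥ threshold) then acc + 1 else acc)
        acc)
    0

-- ===== PRECONDITION & SPEC =====
-- Pre_ excludes association lists with duplicate (x, y) keys: they do not represent
-- any Python dict (dict construction collapses duplicates), so A's first-match
-- behaviour on them is accidental.
def Pre_count_shortcuts (distances : List (Int × Int × Int)) (radius : Int) (threshold : Int) : Prop :=
  (distances.map fun e => (e.1, e.2.1)).Nodup

instance (distances : List (Int × Int × Int)) (radius : Int) (threshold : Int) : Decidable (Pre_count_shortcuts distances radius threshold) := by unfold Pre_count_shortcuts; infer_instance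

def pvWitness_count_shortcuts : (List (Int × Int × Int)) × Int × Int := ([(0, 0, 0), (1, 0, 3)], 1, 0)

def Spec_count_shortcuts (distances : List (Int × Int × Int)) (radius : Int) (threshold : Int) (out : Int) : Prop := out = count_shortcuts_alt distances radius threshold
instance (distances : List (Int × Int × Int)) (radius : Int) (threshold : Int) (out : Int) : Decidable (Spec_count_shortcuts distances radius threshold out) := by unfold Spec_count_shortcuts; infer_instance

-- ===== CLAIM (what is proved, stated in full; the proofs are below) =====
def Claim_equal_count_shortcuts : Prop := ∀ (distances : List (Int × Int × Int)) (radius : Int) (threshold : Int), Dom_count_shortcuts distances radius threshold → Pre_count_shortcuts distances radius threshold → Spec_count_shortcuts distances radius threshold (count_shortcuts distances radius threshold)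

-- ===== LEMMAS AND PROOFS =====

-- membership in A's neighbor list is exactly "manhattan distance ≤ radius"
theorem mem_pvGetNeighbors (x y r : Int) (p : Int × Int) :
    p ∈ pvGetNeighbors x y r ↔ |x - p.1| + |y - p.2| ≤ r := by
  simp only [pvGetNeighbors, List.mem_flatMap, List.mem_map, List.mem_filter,
    PySem.List.mem_pyRange_one, pvMan, decide_eq_true_eq, sub_zero]
  constructor
  · rintro ⟨dx, ⟨hdx1, hdx2⟩, dy, ⟨⟨hdy1, hdy2⟩, habs⟩, rfl⟩
    have h1 : |x - (x + dx)| = |dx| := by rw [show x - (x + dx) = -dx by ring, abs_neg]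
    have h2 : |y - (y + dy)| = |dy| := by rw [show y - (y + dy) = -dy by ring, abs_neg]
    simpa [h1, h2] using habs
  · intro h
    have e1 : |p.1 - x| = |x - p.1| := abs_sub_comm _ _
    have e2 : |p.2 - y| = |y - p.2| := abs_sub_comm _ _
    have n1 := abs_nonneg (x - p.1)
    have n2 := abs_nonneg (y - p.2)
    have b1 := abs_le.1 (show |p.1 - x| ≤ r by rw [e1]; omega)
    have b2 := abs_le.1 (show |p.2 - y| ≤ r by rw [e2]; omega)
    refine ⟨p.1 - x, ⟨by omega, by omega⟩, p.2 - y, ⟨⟨by omega, by omega⟩, by rw [e1, e2]; omega⟩, ?_⟩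
    rw [Prod.ext_iff]
    exact ⟨by simp, by simp⟩

theorem nodup_pvGetNeighbors (x y r : Int) : (pvGetNeighbors x y r).Nodup := by
  unfold pvGetNeighbors
  refine List.nodup_flatMap.2 ⟨?_, ?_⟩
  · intro dx _
    refine List.Nodup.map_on ?_ ((PySem.List.nodup_pyRange_one _ _).filter _)
    intro a _ b _ hab
    have := congrArg Prod.snd hab
    simp only at this
    omega
  · refine (PySem.List.pairwise_lt_pyRange_one _ _).imp ?_
    intro dx1 dx2 hlt a ha1 ha2
    simp only [List.mem_map, List.mem_filter] at ha1 ha2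
    obtain ⟨dy1, _, rfl⟩ := ha1
    obtain ⟨dy2, _, h2⟩ := ha2
    have := congrArg Prod.fst h2
    simp only at this
    omega

theorem lookup_mem {d : List (Int × Int × Int)} (hd : (d.map fun e => (e.1, e.2.1)).Nodup)
    {e : Int × Int × Int} (he : e ∈ d) : pvLookup d (e.1, e.2.1) = some e.2.2 := by
  induction d with
  | nil => cases he
  | cons a rest ih =>
    rw [List.map_cons, List.nodup_cons] at hd
    rcases List.mem_cons.1 he with rfl | hmem
    · simp [pvLookup]
    · have hne : (a.1, a.2.1) ≠ (e.1, e.2.1) := by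
        intro h
        exact hd.1 (h ▸ List.mem_map_of_mem hmem)
      simp only [pvLookup, if_neg hne]
      exact ih hd.2 hmem

theorem countP_disjoint_or {α : Type} (l : List α) (p q : α → Bool)
    (h : ∀ x ∈ l, ¬(p x = true ∧ q x = true)) :
    l.countP (fun x => p x || q x) = l.countP p + l.countP q := by
  induction l with
  | nil => rfl
  | cons a l ih =>
    have ha := h a (List.mem_cons_self)
    have ih' := ih fun x hx => h x (List.mem_cons_of_mem _ hx)
    by_cases hp : p a = true <;> by_cases hq : q a = true <;>
      simp_all <;> omega

-- count of entries of d whose key equals a fixed key, as a lookup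
theorem countP_single_key (d : List (Int × Int × Int))
    (hd : (d.map fun e => (e.1, e.2.1)).Nodup) (k : Int × Int) (R : Int × Int × Int → Bool) :
    d.countP (fun q => decide ((q.1, q.2.1) = k) && R q)
      = (match pvLookup d k with
         | none => 0
         | some v => if R (k.1, k.2, v) then 1 else 0) := by
  induction d with
  | nil => rfl
  | cons a rest ih =>
    rw [List.map_cons, List.nodup_cons] at hd
    by_cases hk : (a.1, a.2.1) = k
    · have hzero : rest.countP (fun q => decide ((q.1, q.2.1) = k) && R q) = 0 := by
        apply List.countP_eq_zero.2
        intro q hq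
        have hne : (q.1, q.2.1) ≠ k := by
          intro h
          exact hd.1 ((h.trans hk.symm) ▸ List.mem_map_of_mem hq)
        simp [hne]
      have hak : (k.1, k.2, a.2.2) = a := by
        obtain ⟨ax, ay, av⟩ := a
        cases hk
        rfl
      rw [List.countP_cons, hzero, Nat.zero_add]
      simp only [pvLookup, if_pos hk, hak]
      by_cases hR : R a = true <;> simp [hk, hR]
    · rw [List.countP_cons, ih hd.2]
      simp only [pvLookup, if_neg hk]
      simp [hk]

-- core counting bijection: neighbors that are stored keys ↔ stored entries whose key is a neighbor
theorem count_core (d : List (Int × Int × Int))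
    (hd : (d.map fun e => (e.1, e.2.1)).Nodup) (R : Int × Int × Int → Bool) :
    ∀ l : List (Int × Int), l.Nodup →
      l.countP (fun nb =>
          match pvLookup d nb with
          | none => false
          | some v => R (nb.1, nb.2, v))
        = d.countP (fun q => decide ((q.1, q.2.1) ∈ l) && R q) := by
  intro l
  induction l with
  | nil => intro _; simp
  | cons a l ih =>
    intro hnd
    rcases List.nodup_cons.1 hnd with ⟨hal, hl⟩
    rw [List.countP_cons, ih hl]
    have hsplit : ∀ q : Int × Int × Int,
        (decide ((q.1, q.2.1) ∈ a :: l) && R q)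
          = ((decide ((q.1, q.2.1) = a) && R q) || (decide ((q.1, q.2.1) ∈ l) && R q)) := by
      intro q
      by_cases h1 : (q.1, q.2.1) = a <;> by_cases h2 : (q.1, q.2.1) ∈ l <;> simp [h1, h2]
    rw [show List.countP (fun q => decide ((q.1, q.2.1) ∈ a :: l) && R q) d
          = List.countP (fun q => (decide ((q.1, q.2.1) = a) && R q
              || decide ((q.1, q.2.1) ∈ l) && R q)) d from
        List.countP_congr (fun q _ => by rw [hsplit q]),
      countP_disjoint_or _ _ _ (by
        intro q _ hpq
        rcases hpq with ⟨h1, h2⟩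
        simp only [Bool.and_eq_true, decide_eq_true_eq] at h1 h2
        exact hal (h1.1 ▸ h2.1)),
      countP_single_key d hd a R]
    cases h : pvLookup d a with
    | none => simp
    | some v =>
      by_cases hR : R (a.1, a.2, v) = true <;> simp [hR] <;> omega

-- A's total as a sum of per-point counts
theorem countA_sum (d : List (Int × Int × Int)) (r t : Int) :
    count_shortcuts d r t
      = ((d.map fun e => (e.1, e.2.1)).map
          (fun point => ((pvGetNeighbors point.1 point.2 r).countP (pvCondA d t point) : Int))).sum := by
  unfold count_shortcuts
  simp only [PySem.List.foldl_count_if, PySem.List.foldl_add]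
  simp

-- B's total as a sum of per-entry counts
theorem countB_sum (d : List (Int × Int × Int)) (r t : Int) :
    count_shortcuts_alt d r t
      = (d.map (fun p => (d.countP (fun q =>
          decide (|p.1 - q.1| + |p.2.1 - q.2.1| ≤ r) &&
          decide (q.2.2 - p.2.2 - (|p.1 - q.1| + |p.2.1 - q.2.1|) ≥ t)) : Int))).sum := by
  unfold count_shortcuts_alt
  simp only [PySem.List.foldl_count_if, PySem.List.foldl_add]
  simp

-- ===== VERDICT (by name: the statement is the Claim_ definition above) =====
theorem count_shortcuts_spec : Claim_equal_count_shortcuts := by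
  intro d r t _ hpre
  unfold Spec_count_shortcuts
  rw [countA_sum, countB_sum, List.map_map]
  congr 1
  apply List.map_congr_left
  intro e he
  simp only [Function.comp]
  congr 1
  have hlook : pvLookup d (e.1, e.2.1) = some e.2.2 := lookup_mem hpre he
  have step1 : (pvGetNeighbors e.1 e.2.1 r).countP (pvCondA d t (e.1, e.2.1))
      = (pvGetNeighbors e.1 e.2.1 r).countP (fun nb =>
          match pvLookup d nb with
          | none => false
          | some v => decide (v - e.2.2 - pvMan (e.1, e.2.1) (nb.1, nb.2) ≥ t)) := by
    apply List.countP_congr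
    intro nb _
    unfold pvCondA
    rw [hlook]
    cases h : pvLookup d nb <;> simp
  calc (pvGetNeighbors e.1 e.2.1 r).countP (pvCondA d t (e.1, e.2.1))
      = (pvGetNeighbors e.1 e.2.1 r).countP (fun nb =>
          match pvLookup d nb with
          | none => false
          | some v => decide (v - e.2.2 - pvMan (e.1, e.2.1) (nb.1, nb.2) ≥ t)) := step1
    _ = d.countP (fun q => decide ((q.1, q.2.1) ∈ pvGetNeighbors e.1 e.2.1 r)
          && decide (q.2.2 - e.2.2 - pvMan (e.1, e.2.1) (q.1, q.2.1) ≥ t)) :=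
        count_core d hpre
          (fun q => decide (q.2.2 - e.2.2 - pvMan (e.1, e.2.1) (q.1, q.2.1) ≥ t))
          _ (nodup_pvGetNeighbors e.1 e.2.1 r)
    _ = d.countP (fun q =>
          decide (|e.1 - q.1| + |e.2.1 - q.2.1| ≤ r) &&
          decide (q.2.2 - e.2.2 - (|e.1 - q.1| + |e.2.1 - q.2.1|) ≥ t)) := by
        apply List.countP_congr
        intro q _
        simp [mem_pvGetNeighbors, pvMan]
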